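-- pv_equiv track=rewrite | github.com/hoanglam2114/gpu_service | app/services/clustering.py | _parse_conversations
-- ===== SOURCE A (Python) =====
-- def _parse_conversations(data):
--     all_pair_texts = []
--     conv_to_pair_indices = []
--     count = 0
--
--     for conv in data:
--         messages = conv.get("messages", [])
--         pairs = []
--         i = 0
--         while i < len(messages):
--             msg = messages[i]
--             if msg.get("role") == "user":
--                 user_content = msg.get("content", "").strip()
--                 if i + 1 < len(messages) and messages[i + 1].get("role") == "assistant":
--                     assistant_content = messages[i + 1].get("content", "").strip()
--                     if user_content and assistant_content:
--                         pairs.append(f"user:{user_content} assistant:{assistant_content}")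
--                     i += 2
--                     continue
--             i += 1
--
--         if pairs:
--             indices = []
--             for pair_text in pairs:
--                 all_pair_texts.append(pair_text)
--                 indices.append(count)
--                 count += 1
--             conv_to_pair_indices.append(indices)
--         else:
--             conv_to_pair_indices.append([])
--
--     return all_pair_texts, conv_to_pair_indices
-- ===== SOURCE B (Python) =====
-- def _pair_text(m1, m2):
--     if m1.get("role") == "user" and m2.get("role") == "assistant":
--         user_content = m1.get("content", "").strip()
--         assistant_content = m2.get("content", "").strip()
--         if user_content and assistant_content:
--             return f"user:{user_content} assistant:{assistant_content}"
--     return None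
--
--
-- def _parse_conversations(data):
--     all_pair_texts = []
--     conv_to_pair_indices = []
--     for conv in data:
--         messages = conv.get("messages", [])
--         pairs = [t for t in map(_pair_text, messages, messages[1:]) if t is not None]
--         start = len(all_pair_texts)
--         all_pair_texts += pairs
--         conv_to_pair_indices.append(list(range(start, start + len(pairs))))
--     return all_pair_texts, conv_to_pair_indices
-- ===== Notes on version B (the rewrite author's own statement) =====
-- stated objective: simpler
-- what changed: Replaces A's manual while-loop cursor with conditional i+=2 skipping by a direct scan of all adjacent message pairs (zip of messages with its tail) -- valid because an assistant partner can never start a pair -- and replaces A's per-pair counter/append index bookkeeping by a single range(start, start+len(pairs)).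
import Mathlib
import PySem

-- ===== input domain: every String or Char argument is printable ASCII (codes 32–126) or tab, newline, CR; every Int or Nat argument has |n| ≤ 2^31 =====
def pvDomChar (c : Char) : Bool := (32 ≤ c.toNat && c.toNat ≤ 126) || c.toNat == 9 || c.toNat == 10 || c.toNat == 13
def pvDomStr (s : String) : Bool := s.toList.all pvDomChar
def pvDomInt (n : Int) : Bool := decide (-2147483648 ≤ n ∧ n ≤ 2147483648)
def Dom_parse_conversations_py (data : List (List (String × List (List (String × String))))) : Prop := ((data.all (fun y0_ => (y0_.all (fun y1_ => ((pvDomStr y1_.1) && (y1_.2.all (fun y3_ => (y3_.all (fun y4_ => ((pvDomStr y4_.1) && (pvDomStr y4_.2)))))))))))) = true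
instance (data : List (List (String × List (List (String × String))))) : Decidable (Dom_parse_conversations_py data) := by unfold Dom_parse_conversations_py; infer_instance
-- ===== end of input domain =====

-- ===== PORT A =====
-- B replaces A's while-loop cursor (conditional i+=2) by a scan of adjacent message
-- pairs and the per-pair counter by a single range; objective: simpler. Return-value
-- equivalence only (neither program mutates its argument).

-- shared tiny helpers: dict lookups and the f-string (identical text in both Pythons)
def pvRole (msg : List (String × String)) : Option String :=
  (PySem.Dict.mk msg).get? "role"

def pvContent (msg : List (String × String)) : String :=
  PySem.Str.strip ((PySem.Dict.mk msg).getD "content" "")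

def pvPairText (u a : String) : String :=
  "user:" ++ u ++ " assistant:" ++ a

-- the 'while i < len(messages)' loop of A, cursor i, accumulator pairs
def pvLoopA (messages : List (List (String × String))) (i : Nat) (pairs : List String) :
    List String :=
  if h : i < messages.length then
    let msg := messages[i]
    if pvRole msg = some "user" then
      let u := pvContent msg
      if h2 : i + 1 < messages.length then
        if pvRole messages[i+1] = some "assistant" then
          let a := pvContent messages[i+1]
          pvLoopA messages (i + 2)
            (if u ≠ "" ∧ a ≠ "" then pairs ++ [pvPairText u a] else pairs)
        else pvLoopA messages (i + 1) pairs
      else pvLoopA messages (i + 1) pairs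
    else pvLoopA messages (i + 1) pairs
  else pairs
termination_by messages.length - i

-- 'for pair_text in pairs: append to all_pair_texts; indices.append(count); count += 1'
def pvIdxStepA (st : List String × List Int × Int) (t : String) :
    List String × List Int × Int :=
  (st.1 ++ [t], st.2.1 ++ [st.2.2], st.2.2 + 1)

-- one iteration of A's 'for conv in data' loop
def pvStepA (st : List String × List (List Int) × Int)
    (conv : List (String × List (List (String × String)))) :
    List String × List (List Int) × Int :=
  let messages := (PySem.Dict.mk conv).getD "messages" []
  let pairs := pvLoopA messages 0 []
  if pairs ≠ [] then
    let r := pairs.foldl pvIdxStepA (st.1, [], st.2.2)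
    (r.1, st.2.1 ++ [r.2.1], r.2.2)
  else (st.1, st.2.1 ++ [([] : List Int)], st.2.2)

def parse_conversations_py (data : List (List (String × List (List (String × String))))) : List String × List (List Int) :=
  let r := data.foldl pvStepA ([], [], 0)
  (r.1, r.2.1)

-- ===== PORT B =====
-- _pair_text(m1, m2) of Source B
def pvPairText? (m1 m2 : List (String × String)) : Option String :=
  if pvRole m1 = some "user" ∧ pvRole m2 = some "assistant" then
    let u := pvContent m1
    let a := pvContent m2
    if u ≠ "" ∧ a ≠ "" then some (pvPairText u a) else none
  else none

-- one iteration of B's 'for conv in data' loop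
def pvStepB (st : List String × List (List Int))
    (conv : List (String × List (List (String × String)))) :
    List String × List (List Int) :=
  let messages := (PySem.Dict.mk conv).getD "messages" []
  let pairs := (messages.zip messages.tail).filterMap (fun p => pvPairText? p.1 p.2)
  let start := (st.1.length : Int)
  (st.1 ++ pairs, st.2 ++ [PySem.List.pyRange start (start + pairs.length) 1])

def parse_conversations_py_alt (data : List (List (String × List (List (String × String))))) : List String × List (List Int) :=
  data.foldl pvStepB ([], [])

-- ===== PRECONDITION & SPEC =====
def Spec_parse_conversations_py (data : List (List (String × List (List (String × String))))) (out : List String × List (List Int)) : Prop := out = parse_conversations_py_alt data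
instance (data : List (List (String × List (List (String × String))))) (out : List String × List (List Int)) : Decidable (Spec_parse_conversations_py data out) := by unfold Spec_parse_conversations_py; infer_instance

-- ===== CLAIM (what is proved, stated in full; the proofs are below) =====
def Claim_equal_parse_conversations_py : Prop := ∀ (data : List (List (String × List (List (String × String))))), Dom_parse_conversations_py data → Spec_parse_conversations_py data (parse_conversations_py data)

-- ===== LEMMAS AND PROOFS =====

-- structural rephrasing of A's cursor loop over the suffix of messages
def pvAdj : List (List (String × String)) → List String
  | m1 :: m2 :: rest =>
    if pvRole m1 = some "user" then
      if pvRole m2 = some "assistant" then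
        (if pvContent m1 ≠ "" ∧ pvContent m2 ≠ "" then [pvPairText (pvContent m1) (pvContent m2)] else [])
          ++ pvAdj rest
      else pvAdj (m2 :: rest)
    else pvAdj (m2 :: rest)
  | _ => []

lemma pvAdj_nil : pvAdj [] = [] := rfl
lemma pvAdj_single (m : List (String × String)) : pvAdj [m] = [] := rfl

lemma pvLoopA_eq_adj (messages : List (List (String × String))) :
    ∀ n i pairs, messages.length - i ≤ n →
      pvLoopA messages i pairs = pairs ++ pvAdj (messages.drop i) := by
  intro n
  induction n with
  | zero =>
    intro i pairs h
    have hle : messages.length ≤ i := by omega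
    rw [pvLoopA]
    simp [Nat.not_lt.mpr hle, List.drop_eq_nil_of_le hle, pvAdj_nil]
  | succ n ih =>
    intro i pairs h
    rw [pvLoopA]
    by_cases hi : i < messages.length
    · have hd : messages.drop i = messages[i] :: messages.drop (i + 1) :=
        (List.getElem_cons_drop hi).symm
      simp only [hi, dif_pos]
      by_cases hu : pvRole messages[i] = some "user"
      · by_cases h2 : i + 1 < messages.length
        · have hd2 : messages.drop (i + 1) = messages[i+1] :: messages.drop (i + 2) :=
            (List.getElem_cons_drop h2).symm
          by_cases ha : pvRole messages[i+1] = some "assistant"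
          · simp only [hu, if_pos, h2, dif_pos, ha]
            rw [ih (i + 2) _ (by omega), hd, hd2, pvAdj]
            simp only [hu, if_pos, ha]
            split_ifs <;> simp
          · simp only [hu, if_pos, h2, dif_pos, ha, if_neg, not_false_iff]
            rw [ih (i + 1) pairs (by omega), hd, hd2, pvAdj]
            simp [hu, ha]
        · have hone : messages.drop (i + 1) = [] :=
            List.drop_eq_nil_of_le (by omega)
          simp only [hu, if_pos, h2, dif_neg, not_false_iff]
          rw [ih (i + 1) pairs (by omega), hd, hone, pvAdj_single, pvAdj_nil]
      · simp only [hu, if_neg, not_false_iff]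
        rw [ih (i + 1) pairs (by omega), hd]
        cases hrest : messages.drop (i + 1) with
        | nil => rw [pvAdj_nil, pvAdj_single]
        | cons m2 rest => rw [pvAdj]; simp [hu]
    · simp [hi, List.drop_eq_nil_of_le (by omega : messages.length ≤ i), pvAdj_nil]

lemma pvPairsB_cons_not_user {m : List (String × String)}
    (hm : ¬ pvRole m = some "user") (l : List (List (String × String))) :
    ((m :: l).zip (m :: l).tail).filterMap (fun p => pvPairText? p.1 p.2)
      = (l.zip l.tail).filterMap (fun p => pvPairText? p.1 p.2) := by
  cases l with
  | nil => simp
  | cons m2 rest =>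
    simp only [List.tail_cons, List.zip_cons_cons, List.filterMap_cons]
    rw [show pvPairText? m m2 = none by simp [pvPairText?, hm]]

lemma pvAdj_eq_pairsB (l : List (List (String × String))) :
    pvAdj l = (l.zip l.tail).filterMap (fun p => pvPairText? p.1 p.2) := by
  induction l using pvAdj.induct with
  | case1 m1 m2 rest h1 h2 ih =>
    have ha : ¬ pvRole m2 = some "user" := by rw [h2]; simp
    have hskip := pvPairsB_cons_not_user ha rest
    simp only [List.tail_cons] at hskip
    rw [pvAdj]
    simp only [h1, h2, if_pos, List.tail_cons, List.zip_cons_cons, List.filterMap_cons,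
      hskip, ← ih]
    have hval : pvPairText? m1 m2
        = if pvContent m1 ≠ "" ∧ pvContent m2 ≠ "" then
            some (pvPairText (pvContent m1) (pvContent m2)) else none := by
      simp [pvPairText?, h1, h2]
    rw [hval]
    split_ifs <;> simp
  | case2 m1 m2 rest h1 h2 ih =>
    rw [pvAdj, if_pos h1, if_neg h2, ih]
    simp only [List.tail_cons, List.zip_cons_cons, List.filterMap_cons]
    rw [show pvPairText? m1 m2 = none by simp [pvPairText?, h2]]
  | case3 m1 m2 rest h1 ih =>
    rw [pvAdj, if_neg h1, ih]
    simp only [List.tail_cons, List.zip_cons_cons, List.filterMap_cons]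
    rw [show pvPairText? m1 m2 = none by simp [pvPairText?, h1]]
  | case4 t h =>
    match t, h with
    | [], _ => simp [pvAdj_nil]
    | [m], _ => simp [pvAdj_single]
    | m1 :: m2 :: rest, h => exact absurd rfl (by exact fun hh => h m1 m2 rest hh)

-- fold of pvIdxStepA, in closed form
lemma pvIdxFold (pairs : List String) :
    ∀ (texts : List String) (idxs : List Int) (c : Int),
      pairs.foldl pvIdxStepA (texts, idxs, c)
        = (texts ++ pairs, idxs ++ PySem.List.pyRange c (c + pairs.length) 1, c + pairs.length) := by
  induction pairs with
  | nil =>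
    intro texts idxs c
    simp [PySem.List.pyRange_one_eq_nil (le_refl c)]
  | cons t rest ih =>
    intro texts idxs c
    simp only [List.foldl_cons, pvIdxStepA, ih, List.length_cons, Nat.cast_add, Nat.cast_one]
    have harith : c + ((rest.length : Int) + 1) = c + 1 + (rest.length : Int) := by ring
    rw [harith, PySem.List.pyRange_one_cons (by omega : c < c + 1 + (rest.length : Int))]
    simp

-- the two outer folds agree (A's running count is B's running length of all_pair_texts)
lemma pvFold_eq (data : List (List (String × List (List (String × String))))) :
    ∀ (texts : List String) (idxs : List (List Int)),
      data.foldl pvStepA (texts, idxs, (texts.length : Int))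
        = ((data.foldl pvStepB (texts, idxs)).1,
           (data.foldl pvStepB (texts, idxs)).2,
           ((data.foldl pvStepB (texts, idxs)).1.length : Int)) := by
  induction data with
  | nil => intro texts idxs; simp
  | cons conv rest ih =>
    intro texts idxs
    simp only [List.foldl_cons]
    have hpairs : pvLoopA ((PySem.Dict.mk conv).getD "messages" []) 0 []
        = ((((PySem.Dict.mk conv).getD "messages" []).zip
              (((PySem.Dict.mk conv).getD "messages" []).tail)).filterMap
            (fun p => pvPairText? p.1 p.2)) := by
      rw [pvLoopA_eq_adj _ (((PySem.Dict.mk conv).getD "messages" []).length) 0 [] (by omega),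
          List.drop_zero, pvAdj_eq_pairsB, List.nil_append]
    by_cases hnil :
        ((((PySem.Dict.mk conv).getD "messages" []).zip
            (((PySem.Dict.mk conv).getD "messages" []).tail)).filterMap
          (fun p => pvPairText? p.1 p.2)) = []
    · have hA : pvStepA (texts, idxs, (texts.length : Int)) conv
          = (texts, idxs ++ [([] : List Int)], (texts.length : Int)) := by
        simp [pvStepA, hpairs, hnil]
      have hB : pvStepB (texts, idxs) conv = (texts, idxs ++ [([] : List Int)]) := by
        simp [pvStepB, hnil]
      rw [hA, hB, ih]
    · have hA : pvStepA (texts, idxs, (texts.length : Int)) conv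
          = (texts ++ ((((PySem.Dict.mk conv).getD "messages" []).zip
                (((PySem.Dict.mk conv).getD "messages" []).tail)).filterMap
              (fun p => pvPairText? p.1 p.2)),
             idxs ++ [PySem.List.pyRange (texts.length : Int)
               ((texts.length : Int) + ((((PySem.Dict.mk conv).getD "messages" []).zip
                  (((PySem.Dict.mk conv).getD "messages" []).tail)).filterMap
                 (fun p => pvPairText? p.1 p.2)).length) 1],
             (texts.length : Int) + ((((PySem.Dict.mk conv).getD "messages" []).zip
                (((PySem.Dict.mk conv).getD "messages" []).tail)).filterMap
               (fun p => pvPairText? p.1 p.2)).length) := by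
        simp [pvStepA, hpairs, hnil, pvIdxFold]
      have hB : pvStepB (texts, idxs) conv
          = (texts ++ ((((PySem.Dict.mk conv).getD "messages" []).zip
                (((PySem.Dict.mk conv).getD "messages" []).tail)).filterMap
              (fun p => pvPairText? p.1 p.2)),
             idxs ++ [PySem.List.pyRange (texts.length : Int)
               ((texts.length : Int) + ((((PySem.Dict.mk conv).getD "messages" []).zip
                  (((PySem.Dict.mk conv).getD "messages" []).tail)).filterMap
                 (fun p => pvPairText? p.1 p.2)).length) 1]) := by
        simp [pvStepB]
      rw [hA, hB]
      have hlen : (texts.length : Int) + ((((PySem.Dict.mk conv).getD "messages" []).zip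
            (((PySem.Dict.mk conv).getD "messages" []).tail)).filterMap
          (fun p => pvPairText? p.1 p.2)).length
          = (((texts ++ ((((PySem.Dict.mk conv).getD "messages" []).zip
              (((PySem.Dict.mk conv).getD "messages" []).tail)).filterMap
            (fun p => pvPairText? p.1 p.2))).length : Int)) := by
        simp
      rw [hlen, ih]

-- ===== VERDICT (by name: the statement is the Claim_ definition above) =====
theorem parse_conversations_py_spec : Claim_equal_parse_conversations_py := by
  intro data _
  unfold Spec_parse_conversations_py parse_conversations_py parse_conversations_py_alt
  have h := pvFold_eq data [] []
  simp only [List.length_nil, Int.natCast_zero] at h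
  rw [h]
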